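-- pv_equiv track=rewrite | github.com/Tainted-Fool/adventofcode | 2015/day15.py | recursive_score
-- ===== SOURCE A (Python) =====
-- def recursive_score(ingredients: list[list[int]], amounts: tuple[int, ...]) -> tuple[int, int]:
--     """
--     Computes the score and calorie count for a given combination of ingredient amount
--
--     Args:
--         ingredients (list[list[int]]): A list of ingredient properties
--         amounts (tuple[int, ...]): A tuple containing the amounts of each ingredient
--
--     Returns:
--         tuple[int, int]: A tuple containing the total score and calorie count of the recipe
--     """
--     num_properties = len(ingredients[0])
--     property_totals = [0] * num_properties
--
--     for i, amount in enumerate(amounts):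
--         for j in range(num_properties):
--             property_totals[j] += amount * ingredients[i][j]
--
--     # Calories are the last property
--     calories = property_totals[-1]
--
--     # Score is the product of all other properties (negative become 0)
--     score = 1
--     for total in property_totals[:-1]:
--         score *= max(0, total)
--
--     return score, calories
-- ===== SOURCE B (Python) =====
-- def recursive_score(ingredients: list[list[int]], amounts: tuple[int, ...]) -> tuple[int, int]:
--     """Purely functional recursive decomposition: the totals vector is built
--     back-to-front by structural recursion over the amounts/rows lists (a fresh
--     list each step, no mutable accumulator array), and the clamped product of
--     the score properties is computed by a second recursion."""
--     num_properties = len(ingredients[0])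
--
--     def scaled_totals(amts, rows):
--         if not amts:
--             return [0] * num_properties
--         rest = scaled_totals(amts[1:], rows[1:])
--         a, row = amts[0], rows[0]
--         return [t + a * row[j] for j, t in enumerate(rest)]
--
--     def clamped_product(ts):
--         if not ts:
--             return 1
--         return max(0, ts[0]) * clamped_product(ts[1:])
--
--     *body, calories = scaled_totals(list(amounts), list(ingredients))
--     return clamped_product(body), calories
-- ===== Notes on version B (the rewrite author's own statement) =====
-- stated objective: alternative
-- what changed: Replaces A's imperative in-place accumulation (mutable totals array updated by nested index loops, then an iterative clamped-product loop) by a purely functional decomposition: the totals vector is built back-to-front by structural recursion over the amounts/rows lists, producing a fresh list at each step, and the score is a separate recursion computing the clamped product; no array is ever mutated and no index loop over properties exists.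
import Mathlib
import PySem

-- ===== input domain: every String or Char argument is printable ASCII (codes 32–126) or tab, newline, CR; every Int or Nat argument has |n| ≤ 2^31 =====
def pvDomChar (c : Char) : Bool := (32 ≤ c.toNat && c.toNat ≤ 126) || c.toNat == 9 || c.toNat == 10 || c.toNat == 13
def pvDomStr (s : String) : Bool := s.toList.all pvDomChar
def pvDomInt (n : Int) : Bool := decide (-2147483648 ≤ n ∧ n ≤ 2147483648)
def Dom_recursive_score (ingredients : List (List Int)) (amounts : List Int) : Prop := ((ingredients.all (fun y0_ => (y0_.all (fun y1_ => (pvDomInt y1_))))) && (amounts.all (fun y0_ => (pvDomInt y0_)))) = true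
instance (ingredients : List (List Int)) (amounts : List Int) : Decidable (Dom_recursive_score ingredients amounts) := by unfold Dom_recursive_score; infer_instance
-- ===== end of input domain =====

-- B replaces A's mutable totals array and nested index loops by a purely functional
-- decomposition: structural recursion building the totals vector back-to-front and a
-- recursive clamped product; same cost, different decomposition.

-- ===== PORT A =====
-- A's inner loop 'for j in range(num_properties): property_totals[j] += amount * ingredients[i][j]'.
-- pyGetD/pySetD are exact for the in-range indices Pre_ guarantees.
def pvInnerA (numProperties : Nat) (amount : Int) (row : List Int) (totals : List Int) : List Int :=
  (PySem.List.pyRange 0 (numProperties : Int) 1).foldl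
    (fun t j =>
      PySem.List.pySetD t j (PySem.List.pyGetD t j 0 + amount * PySem.List.pyGetD row j 0))
    totals

def recursive_score (ingredients : List (List Int)) (amounts : List Int) : Int × Int :=
  let num_properties : Nat := ((PySem.List.pyGet? ingredients 0).getD []).length
  let init : List Int := List.replicate num_properties 0
  let property_totals : List Int :=
    (PySem.List.enumerate amounts 0).foldl
      (fun totals pr =>
        pvInnerA num_properties pr.2 ((PySem.List.pyGet? ingredients pr.1).getD []) totals)
      init
  let calories : Int := PySem.List.pyGetD property_totals (-1) 0
  let score : Int :=
    (PySem.List.slice property_totals none (some (-1))).foldl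
      (fun s total => s * max 0 total) 1
  (score, calories)

-- ===== PORT B =====
-- Source B's 'scaled_totals(amts, rows)': structural recursion, fresh list each step.
-- 'rows[0]'/'row[j]' are ported with pyGet?/pyGetD, exact for the in-range accesses
-- Pre_ guarantees.
def pvScaledTotals (num : Nat) : List Int → List (List Int) → List Int
  | [], _ => List.replicate num 0
  | a :: as, rows =>
      let rest := pvScaledTotals num as rows.tail
      let row := (PySem.List.pyGet? rows 0).getD []
      (PySem.List.enumerate rest 0).map (fun p => p.2 + a * PySem.List.pyGetD row p.1 0)

-- Source B's 'clamped_product(ts)'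
def pvClampedProduct : List Int → Int
  | [] => 1
  | t :: ts => max 0 t * pvClampedProduct ts

def recursive_score_alt (ingredients : List (List Int)) (amounts : List Int) : Int × Int :=
  let num_properties : Nat := ((PySem.List.pyGet? ingredients 0).getD []).length
  let totals : List Int := pvScaledTotals num_properties amounts ingredients
  -- '*body, calories = totals' (totals nonempty under Pre_)
  let body : List Int := totals.dropLast
  let calories : Int := (totals.getLast?).getD 0
  (pvClampedProduct body, calories)

-- ===== PRECONDITION & SPEC =====
-- Exactly where Python A returns: a nonempty ingredient list with at least one property,
-- no more amounts than ingredients, and every accessed row long enough (else IndexError).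
def Pre_recursive_score (ingredients : List (List Int)) (amounts : List Int) : Prop :=
  ingredients ≠ [] ∧
  0 < (ingredients.headD []).length ∧
  amounts.length ≤ ingredients.length ∧
  ∀ i < amounts.length, (ingredients.headD []).length ≤ (ingredients.getD i []).length
instance (ingredients : List (List Int)) (amounts : List Int) : Decidable (Pre_recursive_score ingredients amounts) := by unfold Pre_recursive_score; infer_instance

def pvWitness_recursive_score : List (List Int) × List Int := ([[2, 3], [1, 4]], [1, 2])

def Spec_recursive_score (ingredients : List (List Int)) (amounts : List Int) (out : Int × Int) : Prop := out = recursive_score_alt ingredients amounts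
instance (ingredients : List (List Int)) (amounts : List Int) (out : Int × Int) : Decidable (Spec_recursive_score ingredients amounts out) := by unfold Spec_recursive_score; infer_instance

-- ===== CLAIM (what is proved, stated in full; the proofs are below) =====
def Claim_equal_recursive_score : Prop := ∀ (ingredients : List (List Int)) (amounts : List Int), Dom_recursive_score ingredients amounts → Pre_recursive_score ingredients amounts → Spec_recursive_score ingredients amounts (recursive_score ingredients amounts)

-- ===== LEMMAS AND PROOFS =====

theorem pvInnerA_partial (a : Int) (row t : List Int) :
    ∀ (k : Nat), k ≤ t.length →
    pvInnerA k a row t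
      = (List.range k).map (fun j => t.getD j 0 + a * PySem.List.pyGetD row (j : Int) 0)
        ++ t.drop k := by
  intro k
  induction k with
  | zero => intro _; simp [pvInnerA, PySem.List.pyRange_one_eq_nil]
  | succ k ih =>
    intro hk
    have hk' : k < t.length := by omega
    have hsplit : PySem.List.pyRange 0 ((k+1 : Nat) : Int) 1
        = PySem.List.pyRange 0 (k : Int) 1 ++ [(k : Int)] := by
      push_cast
      exact PySem.List.pyRange_one_succ_right (by omega)
    have hd : t.drop k = t[k] :: t.drop (k+1) := List.drop_eq_getElem_cons hk'
    unfold pvInnerA at ih ⊢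
    rw [hsplit, List.foldl_append, ih (by omega), hd]
    simp only [List.foldl_cons, List.foldl_nil, PySem.List.pySetD_natCast,
      PySem.List.pyGetD_natCast, List.getD]
    rw [List.getElem?_append_right (by simp), List.set_append_right _ _ (by simp)]
    simp [List.range_succ]
    rw [hd]
    rfl

theorem pvInnerA_map_range (p : Nat) (a : Int) (row : List Int) (g : Nat → Int) :
    pvInnerA p a row ((List.range p).map g)
      = (List.range p).map (fun j => g j + a * PySem.List.pyGetD row (j : Int) 0) := by
  rw [pvInnerA_partial a row _ p (by simp)]
  rw [List.drop_eq_nil_of_le (by simp), List.append_nil]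
  refine List.map_congr_left (fun j hj => ?_)
  rw [PySem.List.getD_map_range g p j 0 (List.mem_range.mp hj)]

theorem pvOuterA (amounts : List Int) (ings : List (List Int)) :
    ∀ (k : Nat) (p : Nat) (g : Nat → Int),
      (PySem.List.enumerate amounts (k : Int)).foldl
        (fun totals pr =>
          pvInnerA p pr.2 ((PySem.List.pyGet? ings pr.1).getD []) totals)
        ((List.range p).map g)
      = (List.range p).map (fun j => g j +
          ((amounts.zip (ings.drop k)).map
            (fun pr => pr.1 * PySem.List.pyGetD pr.2 (j : Int) 0)).sum) := by
  induction amounts with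
  | nil => intro k p g; simp [PySem.List.enumerate_nil]
  | cons a as ih =>
    intro k p g
    rw [PySem.List.enumerate_cons a as (k : Int)]
    simp only [List.foldl_cons]
    rw [pvInnerA_map_range]
    have hcast : (k : Int) + 1 = ((k + 1 : Nat) : Int) := by push_cast; ring
    rw [hcast, ih (k + 1) p]
    by_cases hkl : k < ings.length
    · have hdk : ings.drop k = ings[k] :: ings.drop (k + 1) := List.drop_eq_getElem_cons hkl
      have hrow : (PySem.List.pyGet? ings (k : Int)).getD [] = ings[k] := by
        rw [PySem.List.pyGet?_natCast, List.getElem?_eq_getElem hkl]; rfl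
      rw [hdk, hrow]
      refine List.map_congr_left (fun j _ => ?_)
      simp only [List.zip_cons_cons, List.map_cons, List.sum_cons]
      ring
    · have hdk : ings.drop k = [] := List.drop_eq_nil_of_le (by omega)
      have hdk1 : ings.drop (k + 1) = [] := List.drop_eq_nil_of_le (by omega)
      have hrow : (PySem.List.pyGet? ings (k : Int)).getD [] = [] := by
        rw [PySem.List.pyGet?_natCast, List.getElem?_eq_none (by omega)]; rfl
      rw [hdk, hdk1, hrow]
      refine List.map_congr_left (fun j _ => ?_)
      simp [PySem.List.pyGetD_natCast]

-- B's totals vector, characterised as the same per-property zip-sums.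
theorem pvScaledTotals_eq (num : Nat) :
    ∀ (as : List Int) (rows : List (List Int)),
      pvScaledTotals num as rows
        = (List.range num).map (fun (j : Nat) =>
            ((as.zip rows).map (fun pr => pr.1 * PySem.List.pyGetD pr.2 (j : Int) 0)).sum) := by
  intro as
  induction as with
  | nil =>
    intro rows
    simp [pvScaledTotals, List.map_const']
  | cons a as ih =>
    intro rows
    show (PySem.List.enumerate (pvScaledTotals num as rows.tail) 0).map
        (fun p => p.2 + a * PySem.List.pyGetD ((PySem.List.pyGet? rows 0).getD []) p.1 0) = _
    rw [ih rows.tail]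
    set g : Nat → Int := fun j =>
      ((as.zip rows.tail).map (fun pr => pr.1 * PySem.List.pyGetD pr.2 (j : Int) 0)).sum with hg
    rw [PySem.List.enumerate_eq_map_pyRange (d := 0), List.map_map]
    simp only [PySem.List.len, List.length_map]
    rw [PySem.List.pyRange_one, List.map_map]
    simp only [Int.sub_zero, Int.toNat_natCast, List.length_range]
    refine List.map_congr_left (fun j hj => ?_)
    have hj' : j < num := List.mem_range.mp hj
    simp only [Function.comp, zero_add, PySem.List.pyGetD_natCast]
    rw [PySem.List.getD_map_range g num j 0 hj']
    cases rows with
    | nil => simp [hg, PySem.List.pyGetD_natCast, PySem.List.pyGet?]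
    | cons r rs =>
      have hrow : (PySem.List.pyGet? (r :: rs) 0).getD [] = r := by simp
      simp only [hrow, List.tail_cons, List.zip_cons_cons, List.map_cons, List.sum_cons, hg]
      simp only [PySem.List.pyGetD_natCast]
      ring

theorem pvClampedProduct_foldl :
    ∀ (l : List Int) (acc : Int),
      l.foldl (fun s t => s * max 0 t) acc = acc * pvClampedProduct l := by
  intro l
  induction l with
  | nil => intro acc; simp [pvClampedProduct]
  | cons t ts ih =>
    intro acc
    simp only [List.foldl_cons, pvClampedProduct, ih]
    ring

theorem pv_main (ings : List (List Int)) (ams : List Int) (hne : ings ≠ [])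
    (hp : 0 < (ings.headD []).length) :
    recursive_score ings ams = recursive_score_alt ings ams := by
  match ings, hne with
  | r :: rest, _ =>
    have hp' : 0 < r.length := by simpa using hp
    simp only [recursive_score, recursive_score_alt]
    have h0 : ((PySem.List.pyGet? (r :: rest) 0).getD []) = r := by simp
    rw [h0]
    have hinit : List.replicate r.length (0 : Int) = (List.range r.length).map (fun _ => 0) := by
      simp [List.map_const']
    rw [hinit]
    have h1 := pvOuterA ams (r :: rest) 0 r.length (fun _ => 0)
    simp only [Nat.cast_zero, List.drop_zero, zero_add] at h1
    rw [h1, pvScaledTotals_eq]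
    set S : Nat → Int :=
      fun j => ((ams.zip (r :: rest)).map (fun pr => pr.1 * PySem.List.pyGetD pr.2 (j : Int) 0)).sum with hS
    have hnil : (List.range r.length).map S ≠ [] := by
      apply List.ne_nil_of_length_pos; simpa using hp'
    rw [PySem.List.pyGetD_neg_one _ _ hnil]
    rw [PySem.List.slice_to_neg_one]
    rw [pvClampedProduct_foldl, one_mul]
    rw [List.getLast?_eq_some_getLast hnil]
    rfl

-- ===== VERDICT (by name: the statement is the Claim_ definition above) =====
theorem recursive_score_spec : Claim_equal_recursive_score := by
  intro ings ams _ hpre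
  unfold Spec_recursive_score
  exact pv_main ings ams hpre.1 hpre.2.1
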